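-- pv_equiv track=rewrite | github.com/kelviy/AVLGraph | src/plotting.py | get_min_count
-- ===== SOURCE A (Python) =====
-- def get_min_count(listx, listy):
--     group = listx[0]
--     min_value = listy[0]
--     min_listx = []
--     min_listy = []
--
--     for i in range(len(listx)):
--         if group != listx[i]:
--             min_listx.append(group)
--             min_listy.append(min_value)
--
--             group = listx[i]
--             min_value = listy[i]
--         else:
--             if min_value > listy[i]:
--                 min_value = listy[i]
--
--     min_listx.append(group)
--     min_listy.append(min_value)
--
--     return min_listx, min_listy
-- ===== SOURCE B (Python) =====
-- def get_min_count(listx, listy):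
--     # Stage 1: find the boundaries of each maximal run of equal consecutive
--     # listx values; stage 2: emit one (key, min of listy-slice) pair per run.
--     keys = []
--     mins = []
--     i, n = 0, len(listx)
--     while i < n:
--         j = i + 1
--         while j < n and listx[j] == listx[i]:
--             j += 1
--         keys.append(listx[i])
--         mins.append(min(listy[i:j]))
--         i = j
--     return keys, mins
-- ===== Notes on version B (the rewrite author's own statement) =====
-- stated objective: alternative
-- what changed: B first delimits each maximal run of equal consecutive listx values with an inner boundary-scan and then takes min() over the corresponding listy slice per run, instead of A's single forward pass maintaining a running group/min accumulator that is flushed on group change.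
import Mathlib
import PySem

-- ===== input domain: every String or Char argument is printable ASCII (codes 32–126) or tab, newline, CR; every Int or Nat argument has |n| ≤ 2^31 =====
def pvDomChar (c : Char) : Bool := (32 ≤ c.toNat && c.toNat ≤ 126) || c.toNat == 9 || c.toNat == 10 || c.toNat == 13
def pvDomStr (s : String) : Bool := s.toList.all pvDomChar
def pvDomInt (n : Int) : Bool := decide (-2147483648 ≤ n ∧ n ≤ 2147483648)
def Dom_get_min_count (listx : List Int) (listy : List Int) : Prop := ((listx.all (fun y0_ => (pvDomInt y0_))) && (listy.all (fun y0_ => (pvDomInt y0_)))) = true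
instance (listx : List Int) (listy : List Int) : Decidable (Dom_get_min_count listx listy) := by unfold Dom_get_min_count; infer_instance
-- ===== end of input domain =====

-- B delimits each maximal run of equal consecutive listx values with an inner boundary scan
-- and then takes min over the matching listy slice per run, instead of A's single running
-- group/min accumulator pass; same cost, different structure (alternative).


-- ===== PORT A =====
-- l[i]: indices are in range under Pre_, so the .getD 0 default is never used there
def pvIdx (l : List Int) (i : Nat) : Int := (PySem.List.pyGet? l (i : Int)).getD 0

-- (listx[i], listy[i])
def pvAcc (listx : List Int) (listy : List Int) (i : Nat) : Int × Int :=
  (pvIdx listx i, pvIdx listy i)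

-- the body of A's for-loop: state = (group, min_value, min_listx, min_listy)
def pvStepA (st : Int × Int × List Int × List Int) (p : Int × Int) :
    Int × Int × List Int × List Int :=
  if st.1 ≠ p.1 then (p.1, p.2, st.2.2.1 ++ [st.1], st.2.2.2 ++ [st.2.1])
  else if st.2.1 > p.2 then (st.1, p.2, st.2.2.1, st.2.2.2)
  else st

def get_min_count (listx : List Int) (listy : List Int) : List Int × List Int :=
  let st := (List.range listx.length).foldl
    (fun st i => pvStepA st (pvAcc listx listy i))
    (pvIdx listx 0, pvIdx listy 0, [], [])
  (st.2.2.1 ++ [st.1], st.2.2.2 ++ [st.2.1])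

-- ===== PORT B =====
-- inner while loop: advance j while j < len(listx) and listx[j] == listx[i] (g = listx[i])
def pvRunEnd (listx : List Int) (g : Int) (j : Nat) : Nat :=
  if h : j < listx.length ∧ pvIdx listx j = g then pvRunEnd listx g (j + 1) else j
termination_by listx.length - j
decreasing_by omega

-- the inner scan never moves j backwards (cited by pvRunsLoop's decreasing_by)
theorem pvRunEnd_ge (listx : List Int) (g : Int) (j : Nat) : j ≤ pvRunEnd listx g j := by
  rw [pvRunEnd]
  split
  · next h => have := pvRunEnd_ge listx g (j + 1); omega
  · omega
termination_by listx.length - j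
decreasing_by omega

-- outer while loop: state = (keys, mins); min(listy[i:j]) is min? of the slice
-- (the .getD 0 default is never used under Pre_: the slice is nonempty there)
def pvRunsLoop (listx listy : List Int) (i : Nat) (keys mins : List Int) : List Int × List Int :=
  if _h : i < listx.length then
    pvRunsLoop listx listy (pvRunEnd listx (pvIdx listx i) (i + 1)) (keys ++ [pvIdx listx i])
      (mins ++ [(PySem.List.min? (PySem.List.slice listy (some (i : Int))
                  (some (pvRunEnd listx (pvIdx listx i) (i + 1) : Int))) (fun y => y)).getD 0])
  else (keys, mins)
termination_by listx.length - i
decreasing_by have := pvRunEnd_ge listx (pvIdx listx i) (i + 1); omega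

def get_min_count_alt (listx : List Int) (listy : List Int) : List Int × List Int :=
  pvRunsLoop listx listy 0 [] []

-- ===== PRECONDITION & SPEC =====
-- Pre_: exactly where Python A returns normally; A raises IndexError on empty listx
-- (listx[0]) and whenever listy is shorter than listx (listy[i]).
def Pre_get_min_count (listx : List Int) (listy : List Int) : Prop :=
  listx ≠ [] ∧ listx.length ≤ listy.length
instance (listx : List Int) (listy : List Int) : Decidable (Pre_get_min_count listx listy) := by
  unfold Pre_get_min_count; infer_instance

def pvWitness_get_min_count : List Int × List Int := ([1, 1, 2], [3, 2, 5])

def Spec_get_min_count (listx : List Int) (listy : List Int) (out : List Int × List Int) : Prop := out = get_min_count_alt listx listy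
instance (listx : List Int) (listy : List Int) (out : List Int × List Int) : Decidable (Spec_get_min_count listx listy out) := by unfold Spec_get_min_count; infer_instance

-- ===== CLAIM (what is proved, stated in full; the proofs are below) =====
def Claim_equal_get_min_count : Prop := ∀ (listx : List Int) (listy : List Int), Dom_get_min_count listx listy → Pre_get_min_count listx listy → Spec_get_min_count listx listy (get_min_count listx listy)

-- ===== LEMMAS AND PROOFS =====

-- canonical front-to-back recursion on the pair list, the common reference point
def pvGm : List (Int × Int) → Int → Int → List Int × List Int
  | [], g, m => ([g], [m])
  | (x, y) :: rest, g, m =>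
    if g ≠ x then
      let r := pvGm rest x y
      (g :: r.1, m :: r.2)
    else pvGm rest g (if m > y then y else m)

-- the pair segment (listx[k], listy[k]) for i ≤ k < j
def pvSeg (listx listy : List Int) (i j : Nat) : List (Int × Int) :=
  (List.range (j - i)).map (fun k => pvAcc listx listy (i + k))

theorem pvMinIf (m y : Int) : (if m > y then y else m) = min m y := by
  rw [min_def]; split_ifs <;> omega

theorem pvIdx_lt (l : List Int) (i : Nat) (h : i < l.length) : pvIdx l i = l[i] := by
  simp [pvIdx, PySem.List.pyGet?_natCast, List.getElem?_eq_getElem h]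

theorem pvSeg_nil (listx listy : List Int) (i j : Nat) (h : j ≤ i) :
    pvSeg listx listy i j = [] := by
  simp [pvSeg, Nat.sub_eq_zero_of_le h]

theorem pvSeg_cons (listx listy : List Int) (i j : Nat) (h : i < j) :
    pvSeg listx listy i j = pvAcc listx listy i :: pvSeg listx listy (i + 1) j := by
  unfold pvSeg
  have h1 : j - i = (j - (i + 1)) + 1 := by omega
  rw [h1, List.range_succ_eq_map, List.map_cons, List.map_map]
  refine congrArg₂ _ (by simp) ?_
  apply List.map_congr_left
  intro k _
  have : i + (k + 1) = (i + 1) + k := by omega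
  simp [Function.comp, this]

theorem pvSeg_split (listx listy : List Int) (i j n' : Nat) (h1 : i ≤ j) (h2 : j ≤ n') :
    pvSeg listx listy i n' = pvSeg listx listy i j ++ pvSeg listx listy j n' := by
  unfold pvSeg
  have h3 : n' - i = (j - i) + (n' - j) := by omega
  rw [h3, List.range_add, List.map_append, List.map_map]
  refine congrArg₂ _ rfl ?_
  apply List.map_congr_left
  intro k _
  have : i + (j - i + k) = j + k := by omega
  simp [Function.comp, this]

-- pvGm swallows a whole run of equal keys, folding the min
theorem pvGm_run (run rest : List (Int × Int)) (g m : Int)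
    (h : ∀ p ∈ run, p.1 = g) :
    pvGm (run ++ rest) g m =
      pvGm rest g (run.foldl (fun m p => if m > p.2 then p.2 else m) m) := by
  induction run generalizing m with
  | nil => simp
  | cons p t ih =>
      obtain ⟨x, y⟩ := p
      have hx : x = g := h (x, y) (List.mem_cons_self)
      subst hx
      simp only [List.cons_append, pvGm, ne_eq, not_true_eq_false, if_false, List.foldl_cons]
      exact ih _ (fun p hp => h p (List.mem_cons_of_mem _ hp))

-- facts about the inner scan
theorem pvRunEnd_le (listx : List Int) (g : Int) (j : Nat) (hj : j ≤ listx.length) :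
    pvRunEnd listx g j ≤ listx.length := by
  rw [pvRunEnd]
  split
  · next h => exact pvRunEnd_le listx g (j + 1) (by omega)
  · exact hj
termination_by listx.length - j
decreasing_by omega

theorem pvRunEnd_eq_g (listx : List Int) (g : Int) (j : Nat) :
    ∀ k, j ≤ k → k < pvRunEnd listx g j → pvIdx listx k = g := by
  rw [pvRunEnd]
  split
  · next h =>
      intro k hk1 hk2
      rcases Nat.eq_or_lt_of_le hk1 with rfl | hlt
      · exact h.2
      · exact pvRunEnd_eq_g listx g (j + 1) k hlt hk2
  · intro k hk1 hk2; omega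
termination_by listx.length - j
decreasing_by omega

-- unfolding equations for the inner scan, stated one-sidedly for safe rewriting
theorem pvRunEnd_pos (listx : List Int) (g : Int) (j : Nat)
    (hc : j < listx.length ∧ pvIdx listx j = g) :
    pvRunEnd listx g j = pvRunEnd listx g (j + 1) := by
  conv_lhs => rw [pvRunEnd]
  exact dif_pos hc

theorem pvRunEnd_neg (listx : List Int) (g : Int) (j : Nat)
    (hc : ¬ (j < listx.length ∧ pvIdx listx j = g)) :
    pvRunEnd listx g j = j := by
  conv_lhs => rw [pvRunEnd]
  exact dif_neg hc

theorem pvRunEnd_ne (listx : List Int) (g : Int) (j : Nat)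
    (h : pvRunEnd listx g j < listx.length) : pvIdx listx (pvRunEnd listx g j) ≠ g := by
  by_cases hc : j < listx.length ∧ pvIdx listx j = g
  · rw [pvRunEnd_pos listx g j hc] at h ⊢
    exact pvRunEnd_ne listx g (j + 1) h
  · rw [pvRunEnd_neg listx g j hc] at h ⊢
    intro hg
    exact hc ⟨h, hg⟩
termination_by listx.length - j
decreasing_by omega

-- min over the slice listy[i:j] equals the run's min-fold over the tail pairs, seeded at listy[i]
theorem pvFoldPair (l : List (Int × Int)) (m : Int) :
    l.foldl (fun m p => if m > p.2 then p.2 else m) m = (l.map (fun p => p.2)).foldl min m := by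
  induction l generalizing m with
  | nil => rfl
  | cons p t ih =>
      rw [List.foldl_cons, List.map_cons, List.foldl_cons, pvMinIf, ih]

theorem pvMinSlice (listx listy : List Int) (i j : Nat)
    (hij : i < j) (hjy : j ≤ listy.length) :
    (PySem.List.min? (PySem.List.slice listy (some (i : Int)) (some (j : Int)))
        (fun y => y)).getD 0 =
      (pvSeg listx listy (i + 1) j).foldl (fun m p => if m > p.2 then p.2 else m)
        (pvIdx listy i) := by
  have hiy : i < listy.length := by omega
  rw [PySem.List.slice_natCast]
  have hdrop : listy.drop i = listy[i] :: listy.drop (i + 1) :=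
    List.drop_eq_getElem_cons hiy
  have htake : (listy.drop i).take (j - i) =
      listy[i] :: (listy.drop (i + 1)).take (j - (i + 1)) := by
    rw [hdrop]
    have : j - i = (j - (i + 1)) + 1 := by omega
    rw [this, List.take_succ_cons]
  rw [htake, PySem.List.min?_id_cons, Option.getD_some]
  -- fold over pairs = fold of min over seconds
  have hmap : (pvSeg listx listy (i + 1) j).map (fun p => p.2) =
      (listy.drop (i + 1)).take (j - (i + 1)) := by
    apply List.ext_getElem
    · simp [pvSeg]; omega
    · intro k h1 h2
      have hk : k < j - (i + 1) := by simpa [pvSeg] using h1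
      simp only [pvSeg, List.map_map, List.getElem_map, List.getElem_range,
        List.getElem_take, List.getElem_drop]
      have : i + 1 + k < listy.length := by omega
      simp [Function.comp, pvAcc, pvIdx_lt listy _ this]
  rw [pvFoldPair, hmap, pvIdx_lt listy i hiy]

-- A's loop: left fold with append-accumulators, characterised by pvGm
theorem pvA_char (ps : List (Int × Int)) :
    ∀ g m mx my,
      (let r := ps.foldl pvStepA (g, m, mx, my)
       (r.2.2.1 ++ [r.1], r.2.2.2 ++ [r.2.1])) =
      (mx ++ (pvGm ps g m).1, my ++ (pvGm ps g m).2) := by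
  induction ps with
  | nil => intro g m mx my; simp [pvGm]
  | cons p rest ih =>
      intro g m mx my
      obtain ⟨x, y⟩ := p
      by_cases hgx : g = x
      · subst hgx
        by_cases hm : m > y
        · simpa [pvStepA, hm, pvGm] using ih g y mx my
        · simpa [pvStepA, hm, pvGm] using ih g m mx my
      · have h1 : pvStepA (g, m, mx, my) (x, y) = (x, y, mx ++ [g], my ++ [m]) := by
          simp [pvStepA, hgx]
        simp only [List.foldl_cons, h1, ih, pvGm, hgx, if_pos, ne_eq, not_false_iff]
        simp

-- B's loop characterised by pvGm on the remaining pair segment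
theorem pvLoop_char (listx listy : List Int) (hy : listx.length ≤ listy.length)
    (i : Nat) (keys mins : List Int) (hi : i < listx.length) :
    pvRunsLoop listx listy i keys mins =
      (keys ++ (pvGm (pvSeg listx listy (i + 1) listx.length) (pvIdx listx i) (pvIdx listy i)).1,
       mins ++ (pvGm (pvSeg listx listy (i + 1) listx.length) (pvIdx listx i) (pvIdx listy i)).2) := by
  rw [pvRunsLoop, dif_pos hi]
  generalize hjdef : pvRunEnd listx (pvIdx listx i) (i + 1) = j
  have hge : i + 1 ≤ j := by rw [← hjdef]; exact pvRunEnd_ge _ _ _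
  have hle : j ≤ listx.length := by rw [← hjdef]; exact pvRunEnd_le _ _ _ (by omega)
  have hrun : ∀ p ∈ pvSeg listx listy (i + 1) j, p.1 = pvIdx listx i := by
    intro p hp
    simp only [pvSeg, List.mem_map, List.mem_range] at hp
    obtain ⟨k, hk, rfl⟩ := hp
    exact pvRunEnd_eq_g listx _ (i + 1) (i + 1 + k) (by omega) (by rw [hjdef]; omega)
  rw [pvSeg_split listx listy (i + 1) j listx.length hge hle, pvGm_run _ _ _ _ hrun,
    pvMinSlice listx listy i j (by omega) (by omega)]
  set m' := (pvSeg listx listy (i + 1) j).foldl (fun m p => if m > p.2 then p.2 else m)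
    (pvIdx listy i) with hm'
  rcases Nat.lt_or_ge j listx.length with hjn | hjn
  · -- another run follows at index j
    have hne : pvIdx listx i ≠ pvIdx listx j := by
      intro h
      have hj' : pvRunEnd listx (pvIdx listx i) (i + 1) < listx.length := by rw [hjdef]; exact hjn
      exact pvRunEnd_ne listx (pvIdx listx i) (i + 1) hj' (by rw [hjdef]; exact h.symm)
    rw [pvSeg_cons listx listy j listx.length hjn]
    have hstep : pvGm (pvAcc listx listy j :: pvSeg listx listy (j + 1) listx.length)
        (pvIdx listx i) m' =
        ((pvIdx listx i) ::
            (pvGm (pvSeg listx listy (j + 1) listx.length) (pvIdx listx j) (pvIdx listy j)).1,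
         m' :: (pvGm (pvSeg listx listy (j + 1) listx.length) (pvIdx listx j) (pvIdx listy j)).2) := by
      simp [pvGm, pvAcc, hne]
    rw [hstep, pvLoop_char listx listy hy j _ _ hjn]
    simp
  · -- the run reaches the end of the list
    have hjeq : j = listx.length := by omega
    subst hjeq
    rw [pvSeg_nil listx listy listx.length listx.length (le_refl _), pvRunsLoop,
      dif_neg (by omega)]
    simp [pvGm]
termination_by listx.length - i
decreasing_by omega

-- ===== VERDICT (by name: the statement is the Claim_ definition above) =====
theorem get_min_count_spec : Claim_equal_get_min_count := by
  intro listx listy _ hpre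
  obtain ⟨hne, hlen⟩ := hpre
  have hn : 0 < listx.length := List.length_pos_of_ne_nil hne
  unfold Spec_get_min_count get_min_count get_min_count_alt
  -- A's fold over indices is a fold over the full pair segment
  have hseg0 : pvSeg listx listy 0 listx.length =
      (List.range listx.length).map (pvAcc listx listy) := by
    simp [pvSeg]
  have hAfold : (List.range listx.length).foldl
      (fun st i => pvStepA st (pvAcc listx listy i))
      (pvIdx listx 0, pvIdx listy 0, [], []) =
      (pvSeg listx listy 0 listx.length).foldl pvStepA
        (pvIdx listx 0, pvIdx listy 0, [], []) := by
    rw [hseg0, List.foldl_map]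
  rw [hAfold]
  have hA := pvA_char (pvSeg listx listy 0 listx.length) (pvIdx listx 0) (pvIdx listy 0) [] []
  simp only [List.nil_append] at hA
  rw [hA]
  -- the full segment starts with the seed pair, which pvGm swallows
  have hcons := pvSeg_cons listx listy 0 listx.length hn
  have hswallow : pvGm (pvSeg listx listy 0 listx.length) (pvIdx listx 0) (pvIdx listy 0) =
      pvGm (pvSeg listx listy 1 listx.length) (pvIdx listx 0) (pvIdx listy 0) := by
    rw [hcons]; simp [pvGm, pvAcc]
  rw [hswallow]
  -- B's loop from index 0
  rw [pvLoop_char listx listy hlen 0 [] [] hn]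
  simp
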